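-- pv_equiv track=rewrite | github.com/tobibrosch/mathematischeprogrammierung | breakout/breakout_vs2.py | rotating_letters
-- ===== SOURCE A (Python) =====
-- def rotating_letters(name):
--     k=0
--     name_list = list(name)
--     new_list = []
--     for i in range(len(name_list)):
--         if name_list[i]==' ':
--             k+=12
--         else:
--             new_list.append((name_list[i],k))
--             k+=10
--     return new_list
-- ===== SOURCE B (Python) =====
-- def rotating_letters(name):
--     inc = [12 if c == ' ' else 10 for c in name]
--     offsets = [0]
--     for x in inc[:-1]:
--         offsets.append(offsets[-1] + x)
--     return [(c, off) for c, off in zip(name, offsets) if c != ' ']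
-- ===== Notes on version B (the rewrite author's own statement) =====
-- stated objective: alternative
-- what changed: B first materialises an increment list and an exclusive prefix-sum offset table, then produces the result by zipping the string with the offsets and filtering out spaces, instead of A's single accumulator-driven loop.
import Mathlib
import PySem

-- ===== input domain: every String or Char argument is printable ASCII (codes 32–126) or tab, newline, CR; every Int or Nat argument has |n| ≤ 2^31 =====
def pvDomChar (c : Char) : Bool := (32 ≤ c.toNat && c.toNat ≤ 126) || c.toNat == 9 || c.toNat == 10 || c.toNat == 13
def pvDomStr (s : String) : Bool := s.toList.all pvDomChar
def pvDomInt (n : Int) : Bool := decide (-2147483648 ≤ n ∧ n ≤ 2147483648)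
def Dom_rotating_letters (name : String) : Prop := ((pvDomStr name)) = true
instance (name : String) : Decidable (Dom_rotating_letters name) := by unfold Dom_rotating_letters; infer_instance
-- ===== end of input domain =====

-- B builds an increment list and an exclusive prefix-sum offset table, then zips-and-filters,
-- instead of A's single accumulator-driven loop (alternative decomposition, same cost).


-- ===== PORT A =====
-- single loop over the characters, state (k, new_list)
def rotating_letters (name : String) : List (String × Int) :=
  (name.toList.foldl
    (fun (st : Int × List (String × Int)) c =>
      if c = ' ' then (st.1 + 12, st.2)
      else (st.1 + 10, st.2 ++ [(String.mk [c], st.1)]))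
    (0, [])).2

-- ===== PORT B =====
-- inc = [12 if c==' ' else 10 for c in name]
def pvIncs (l : List Char) : List Int := l.map (fun c => if c = ' ' then 12 else 10)

-- offsets = [0]; for x in inc[:-1]: offsets.append(offsets[-1] + x)   (inc[:-1] = dropLast, exact)
def rotating_letters_alt (name : String) : List (String × Int) :=
  ((name.toList.zip
      ((pvIncs name.toList).dropLast.foldl (fun (acc : List Int) x => acc ++ [acc.getLast! + x]) [0])
    ).filter (fun p => p.1 != ' ')).map (fun p => (String.mk [p.1], p.2))

-- ===== PRECONDITION & SPEC =====
def Spec_rotating_letters (name : String) (out : List (String × Int)) : Prop := out = rotating_letters_alt name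
instance (name : String) (out : List (String × Int)) : Decidable (Spec_rotating_letters name out) := by unfold Spec_rotating_letters; infer_instance

-- ===== CLAIM (what is proved, stated in full; the proofs are below) =====
def Claim_equal_rotating_letters : Prop := ∀ (name : String), Dom_rotating_letters name → Spec_rotating_letters name (rotating_letters name)

-- ===== LEMMAS AND PROOFS =====

-- the common specification: exclusive running offset pairing of the non-space chars
def pvG : List Char → Int → List (String × Int)
  | [], _ => []
  | c :: cs, k => if c = ' ' then pvG cs (k + 12) else (String.mk [c], k) :: pvG cs (k + 10)

-- exclusive prefix sums
def pvScanE : List Int → Int → List Int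
  | [], k => [k]
  | x :: xs, k => k :: pvScanE xs (k + x)

theorem pvA_fold (l : List Char) : ∀ (k : Int) (acc : List (String × Int)),
    (l.foldl
      (fun (st : Int × List (String × Int)) c =>
        if c = ' ' then (st.1 + 12, st.2)
        else (st.1 + 10, st.2 ++ [(String.mk [c], st.1)]))
      (k, acc)).2 = acc ++ pvG l k := by
  induction l with
  | nil => intro k acc; simp [pvG]
  | cons c cs ih =>
    intro k acc
    by_cases h : c = ' ' <;> simp [pvG, h, ih, List.append_assoc]

theorem pvFoldl_scan (xs : List Int) : ∀ (acc : List Int) (k : Int),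
    List.foldl (fun (a : List Int) x => a ++ [a.getLast! + x]) (acc ++ [k]) xs
      = acc ++ pvScanE xs k := by
  induction xs with
  | nil => intro acc k; simp [pvScanE]
  | cons x xs ih =>
    intro acc k
    have hlast : (acc ++ [k]).getLast! = k := by
      induction acc <;> simp [List.getLast!, List.getLast_append_of_ne_nil]
    simp only [List.foldl_cons, hlast]
    rw [ih (acc ++ [k]) (k + x)]
    simp [pvScanE]

theorem pvB_eq_g (l : List Char) : ∀ (k : Int),
    ((l.zip (pvScanE (pvIncs l).dropLast k)).filter (fun p => p.1 != ' ')).map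
      (fun p => (String.mk [p.1], p.2)) = pvG l k := by
  induction l with
  | nil => intro k; simp [pvG]
  | cons c cs ih =>
    intro k
    cases cs with
    | nil =>
      by_cases h : c = ' ' <;> simp [pvIncs, pvScanE, pvG, h]
    | cons c' cs' =>
      have hinc : (pvIncs (c :: c' :: cs')).dropLast
          = (if c = ' ' then (12 : Int) else 10) :: (pvIncs (c' :: cs')).dropLast := by
        simp [pvIncs]
      rw [hinc]
      by_cases h : c = ' ' <;> simp [pvScanE, pvG, h, ih]

-- ===== VERDICT (by name: the statement is the Claim_ definition above) =====
theorem rotating_letters_spec : Claim_equal_rotating_letters := by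
  intro name _
  show rotating_letters name = rotating_letters_alt name
  unfold rotating_letters rotating_letters_alt
  rw [pvA_fold name.toList 0 [], show ([0] : List Int) = [] ++ [0] from rfl, pvFoldl_scan]
  simp [pvB_eq_g]
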